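-- pv_equiv track=rewrite | github.com/PsychoLeo/informatique | lessons/nsi/1.1turing_machine.py | machine
-- ===== SOURCE A (Python) =====
-- def machine (r, i=0, state=1) :
--     assert state in (0, 1, 2, 3), 'state has to be 1, 2 or 3'
--     if state == 1 : # case state in java
--         assert r[i] == None
--         return machine (r, i+1, 2)
--     elif state == 2 :
--         if r[i] == None :
--             return machine (r, i-1, 3)
--         else :
--             return machine (r, i+1, 2)
--     elif state == 3 : # state is 3
--         if r[i] == 0 :
--             r[i] = 1
--             return machine (r, i-1, 0)
--         elif r[i] == 1 :
--             r[i] = 0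
--             return machine (r, i-1, 3)
--         else :
--             return machine (r, i-1, 0)
--     else :
--         return r
-- ===== SOURCE B (Python) =====
-- def machine(r, i=0, state=1):
--     assert state in (0, 1, 2, 3), 'state has to be 1, 2 or 3'
--     if state == 1:
--         assert r[i] == None
--         i, state = i + 1, 2
--     if state == 2:
--         while r[i] != None:
--             i += 1
--         i, state = i - 1, 3
--     if state == 3:
--         while r[i] == 1:
--             r[i] = 0
--             i -= 1
--         if r[i] == 0:
--             r[i] = 1
--     return r
-- ===== Notes on version B (the rewrite author's own statement) =====
-- stated objective: idiomatic
-- what changed: Replaced A's mutually recursive per-step state dispatch (one recursive call per machine step) by a straight-line iterative decomposition: entry check, a rightward while-scan for the blank, a leftward while-flip of 1s, and one final write.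
import Mathlib
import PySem

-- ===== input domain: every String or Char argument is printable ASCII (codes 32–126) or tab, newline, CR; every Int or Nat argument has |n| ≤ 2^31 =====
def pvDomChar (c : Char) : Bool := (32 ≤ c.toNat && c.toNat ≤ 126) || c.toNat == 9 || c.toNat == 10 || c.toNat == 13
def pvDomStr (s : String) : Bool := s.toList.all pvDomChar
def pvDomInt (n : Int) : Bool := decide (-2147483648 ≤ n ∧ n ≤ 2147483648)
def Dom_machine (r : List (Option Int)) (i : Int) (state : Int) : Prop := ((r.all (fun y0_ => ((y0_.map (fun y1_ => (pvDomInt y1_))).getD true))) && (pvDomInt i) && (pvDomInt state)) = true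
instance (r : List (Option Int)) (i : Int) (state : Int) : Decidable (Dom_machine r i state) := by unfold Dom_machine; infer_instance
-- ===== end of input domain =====

-- B replaces A's mutually recursive state dispatch by three straight-line phases (entry check,
-- rightward scan loop, leftward flip loop + final write); same return value AND same final tape
-- mutation (the Lean ports thread the tape functionally; the equivalence is about the returned tape,
-- which is also the mutated tape). Objective: idiomatic iterative loop instead of deep recursion.

-- ===== PORT A =====
-- A's recursion terminates (or raises) within 4*len+9 steps on every input; the fuel only makes the
-- same computation total — the zero-fuel branch is unreachable (proved inside the lemmas below).
def goA : Nat → List (Option Int) → Int → Int → List (Option Int)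
  | 0, r, _, _ => r
  | f+1, r, i, state =>
    if state = 1 then
      match PySem.List.pyGet? r i with
      | some none => goA f r (i+1) 2          -- assert r[i] == None passes
      | _ => r                                 -- IndexError / AssertionError (outside Pre_)
    else if state = 2 then
      match PySem.List.pyGet? r i with
      | some none => goA f r (i-1) 3
      | some (some _) => goA f r (i+1) 2
      | none => r                              -- IndexError (outside Pre_)
    else if state = 3 then
      match PySem.List.pyGet? r i with
      | some (some x) =>
        if x = 0 then goA f (PySem.List.pySetD r i (some 1)) (i-1) 0
        else if x = 1 then goA f (PySem.List.pySetD r i (some 0)) (i-1) 3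
        else goA f r (i-1) 0                   -- another int: final else branch
      | some none => goA f r (i-1) 0           -- r[i] is None: final else branch
      | none => r                              -- IndexError (outside Pre_)
    else r                                     -- state 0 (and bad state = AssertionError, outside Pre_)

def machine (r : List (Option Int)) (i : Int) (state : Int) : List (Option Int) :=
  goA (4 * r.length + 9) r i state

-- ===== PORT B =====
-- phase 'state 2': while r[i] != None: i += 1   — returns the index where None is found
def scanB : Nat → List (Option Int) → Int → Option Int
  | 0, _, _ => none
  | f+1, r, i =>
    match PySem.List.pyGet? r i with
    | some none => some i
    | some (some _) => scanB f r (i+1)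
    | none => none                             -- IndexError (outside Pre_)

-- phase 'state 3' loop: while r[i] == 1: r[i] = 0; i -= 1
def flipB : Nat → List (Option Int) → Int → List (Option Int) × Int
  | 0, r, i => (r, i)
  | f+1, r, i =>
    match PySem.List.pyGet? r i with
    | some (some x) =>
      if x = 1 then flipB f (PySem.List.pySetD r i (some 0)) (i-1) else (r, i)
    | _ => (r, i)

-- phase 'state 3': the loop, then 'if r[i] == 0: r[i] = 1'
def finishB (g : Nat) (r : List (Option Int)) (m : Int) : List (Option Int) :=
  match flipB g r m with
  | (r', i') =>
    match PySem.List.pyGet? r' i' with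
    | some (some x) => if x = 0 then PySem.List.pySetD r' i' (some 1) else r'
    | _ => r'

def machine_alt (r : List (Option Int)) (i : Int) (state : Int) : List (Option Int) :=
  if state = 0 then r
  else if state = 1 then
    match PySem.List.pyGet? r i with
    | some none =>
      match scanB (4 * r.length + 9) r (i+1) with
      | some u => finishB (4 * r.length + 9) r (u-1)
      | none => r
    | _ => r
  else if state = 2 then
    match scanB (4 * r.length + 9) r i with
    | some u => finishB (4 * r.length + 9) r (u-1)
    | none => r
  else if state = 3 then finishB (4 * r.length + 9) r i
  else r

-- ===== PRECONDITION & SPEC =====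
-- Pre_ excludes exactly the inputs on which the Python A raises: a state outside {0,1,2,3}
-- (AssertionError), a non-None cell under the head in state 1 (AssertionError), a rightward scan
-- that runs off the right end, or a leftward flip that runs off the left end (IndexError) —
-- Python's negative-index wraparound is accounted for.
def pyIx (n : Nat) (t : Int) : Nat := (if t < 0 then t + n else t).toNat

-- state-3 run from head m returns normally iff the head is a valid (possibly negative) index and,
-- when m < 0 (no wraparound available), some cell at or left of it is not 1
def pre3B (r : List (Option Int)) (m : Int) : Bool :=
  decide (-(r.length : Int) ≤ m) && decide (m < (r.length : Int)) &&
  (decide (0 ≤ m) || (r.take (pyIx r.length m + 1)).any (fun x => x != some 1))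

-- the index (as Python index value) at which the state-2 scan starting at j first reads None
def firstNoneIdx (r : List (Option Int)) (j : Int) : Option Int :=
  if -(r.length : Int) ≤ j && j < (r.length : Int) then
    match (r.drop (pyIx r.length j)).findIdx? (fun x => x == none) with
    | some k => some (j + (k : Int))
    | none => if j < 0 then (r.findIdx? (fun x => x == none)).map Int.ofNat else none
  else none

def pre2B (r : List (Option Int)) (j : Int) : Bool :=
  match firstNoneIdx r j with
  | some u => pre3B r (u-1)
  | none => false

def Pre_machine (r : List (Option Int)) (i : Int) (state : Int) : Prop :=
  state = 0 ∨
  (state = 1 ∧ PySem.List.pyGet? r i = some none ∧ pre2B r (i+1) = true) ∨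
  (state = 2 ∧ pre2B r i = true) ∨
  (state = 3 ∧ pre3B r i = true)

instance (r : List (Option Int)) (i : Int) (state : Int) : Decidable (Pre_machine r i state) := by
  unfold Pre_machine; infer_instance

def pvWitness_machine : List (Option Int) × Int × Int := ([none, some 1, some 1, none], 0, 1)

def Spec_machine (r : List (Option Int)) (i : Int) (state : Int) (out : List (Option Int)) : Prop := out = machine_alt r i state
instance (r : List (Option Int)) (i : Int) (state : Int) (out : List (Option Int)) : Decidable (Spec_machine r i state out) := by unfold Spec_machine; infer_instance

-- ===== CLAIM (what is proved, stated in full; the proofs are below) =====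
def Claim_equal_machine : Prop := ∀ (r : List (Option Int)) (i : Int) (state : Int), Dom_machine r i state → Pre_machine r i state → Spec_machine r i state (machine r i state)

-- ===== LEMMAS AND PROOFS =====

theorem pyGet?_some_inRange {r : List (Option Int)} {i : Int} {v : Option Int}
    (h : PySem.List.pyGet? r i = some v) : -(r.length : Int) ≤ i ∧ i < (r.length : Int) := by
  by_contra hc
  have : PySem.List.pyGet? r i = none := by
    rw [PySem.List.pyGet?_eq_none_iff]
    unfold PySem.Raise.InRange
    omega
  simp [this] at h

theorem pyGet?_none_outRange {r : List (Option Int)} {i : Int}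
    (h : ¬ (-(r.length : Int) ≤ i ∧ i < (r.length : Int))) : PySem.List.pyGet? r i = none := by
  rw [PySem.List.pyGet?_eq_none_iff]
  unfold PySem.Raise.InRange
  omega

theorem goA_succ (f : Nat) (r : List (Option Int)) (i : Int) (state : Int) :
    goA (f+1) r i state =
    (if state = 1 then
      match PySem.List.pyGet? r i with
      | some none => goA f r (i+1) 2
      | _ => r
    else if state = 2 then
      match PySem.List.pyGet? r i with
      | some none => goA f r (i-1) 3
      | some (some _) => goA f r (i+1) 2
      | none => r
    else if state = 3 then
      match PySem.List.pyGet? r i with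
      | some (some x) =>
        if x = 0 then goA f (PySem.List.pySetD r i (some 1)) (i-1) 0
        else if x = 1 then goA f (PySem.List.pySetD r i (some 0)) (i-1) 3
        else goA f r (i-1) 0
      | some none => goA f r (i-1) 0
      | none => r
    else r) := rfl

theorem scanB_succ (g : Nat) (r : List (Option Int)) (i : Int) :
    scanB (g+1) r i = match PySem.List.pyGet? r i with
      | some none => some i
      | some (some _) => scanB g r (i+1)
      | none => none := rfl

theorem flipB_succ (g : Nat) (r : List (Option Int)) (i : Int) :
    flipB (g+1) r i = match PySem.List.pyGet? r i with
      | some (some x) =>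
        if x = 1 then flipB g (PySem.List.pySetD r i (some 0)) (i-1) else (r, i)
      | _ => (r, i) := rfl

-- with enough fuel the scan loop is fuel-insensitive
theorem scan_fuel (g : Nat) : ∀ (r : List (Option Int)) (i : Int),
    ((-(r.length : Int) ≤ i ∧ i < (r.length : Int)) → (r.length : Int) - i + 1 ≤ (g : Int)) →
    scanB g r i = scanB (g+1) r i := by
  induction g with
  | zero =>
    intro r i h
    have hout : ¬ (-(r.length : Int) ≤ i ∧ i < (r.length : Int)) := by
      intro hin; have := h hin; omega
    simp [scanB, pyGet?_none_outRange hout]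
  | succ g ih =>
    intro r i h
    rw [scanB_succ, scanB_succ (g+1)]
    cases hg : PySem.List.pyGet? r i with
    | none => rfl
    | some v =>
      cases v with
      | none => rfl
      | some x =>
        have hin := pyGet?_some_inRange hg
        have hb := h hin
        exact ih r (i+1) (fun _ => by push_cast at hb ⊢; omega)

-- with enough fuel the flip loop is fuel-insensitive
theorem flip_fuel (g : Nat) : ∀ (r : List (Option Int)) (m : Int),
    ((-(r.length : Int) ≤ m ∧ m < (r.length : Int)) → m + (r.length : Int) + 2 ≤ (g : Int)) →
    flipB g r m = flipB (g+1) r m := by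
  induction g with
  | zero =>
    intro r m h
    have hout : ¬ (-(r.length : Int) ≤ m ∧ m < (r.length : Int)) := by
      intro hin; have := h hin; omega
    simp [flipB, pyGet?_none_outRange hout]
  | succ g ih =>
    intro r m h
    rw [flipB_succ, flipB_succ (g+1)]
    cases hg : PySem.List.pyGet? r m with
    | none => rfl
    | some v =>
      cases v with
      | none => rfl
      | some x =>
        by_cases hx : x = 1
        · subst hx
          simp only [reduceIte]
          have hin := pyGet?_some_inRange hg
          have hb := h hin
          have hlen : (PySem.List.pySetD r m (some 0)).length = r.length :=
            PySem.List.length_pySetD ..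
          exact ih _ (m-1) (fun hin' => by rw [hlen] at hin' ⊢; push_cast at hb ⊢; omega)
        · simp only [if_neg hx]

theorem pySetD_length (r : List (Option Int)) (m : Int) (v : Option Int) :
    (PySem.List.pySetD r m v).length = r.length := PySem.List.length_pySetD ..

-- A's state-3 recursion equals B's flip-then-fix phase
theorem ML3 : ∀ (f g : Nat) (r : List (Option Int)) (m : Int),
    2 ≤ f →
    ((-(r.length : Int) ≤ m ∧ m < (r.length : Int)) → m + (r.length : Int) + 4 ≤ (f : Int)) →
    ((-(r.length : Int) ≤ m ∧ m < (r.length : Int)) → m + (r.length : Int) + 2 ≤ (g : Int)) →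
    goA f r m 3 = finishB g r m := by
  intro f
  induction f with
  | zero => intro g r m hf; omega
  | succ f ih =>
    intro g r m hf hfm hgm
    rw [goA_succ]
    norm_num
    cases hg : PySem.List.pyGet? r m with
    | none =>
      have hout : ¬ (-(r.length : Int) ≤ m ∧ m < (r.length : Int)) := by
        intro hin
        exact absurd hg (by simp [PySem.List.pyGet?_eq_none_iff]; unfold PySem.Raise.InRange; omega)
      have hstop : flipB g r m = (r, m) := by
        cases g with
        | zero => rfl
        | succ g => rw [flipB_succ, hg]
      simp [finishB, hstop, hg]
    | some v =>
      have hin := pyGet?_some_inRange hg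
      have hf4 := hfm hin
      have hg2 := hgm hin
      have hret0 : ∀ (r' : List (Option Int)) (j : Int), goA f r' j 0 = r' := by
        intro r' j
        obtain ⟨f', rfl⟩ : ∃ f', f = f'+1 := ⟨f-1, by omega⟩
        rfl
      have hstop : ∀ hv : v ≠ some 1, flipB g r m = (r, m) := by
        intro hv
        cases g with
        | zero => rfl
        | succ g =>
          rw [flipB_succ, hg]
          cases v with
          | none => rfl
          | some x =>
            have : x ≠ 1 := by intro h; exact hv (by rw [h])
            simp [this]
      cases v with
      | none =>
        simp [hret0, finishB, hstop (by simp), hg]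
      | some x =>
        by_cases hx0 : x = 0
        · subst hx0
          simp [hret0, finishB, hstop (by simp), hg]
        · by_cases hx1 : x = 1
          · subst hx1
            simp only [if_neg hx0]
            obtain ⟨g', rfl⟩ : ∃ g', g = g'+1 := ⟨g-1, by omega⟩
            have hlen := pySetD_length r m (some 0)
            have step : goA f (PySem.List.pySetD r m (some 0)) (m-1) 3 =
                finishB (g'+1) (PySem.List.pySetD r m (some 0)) (m-1) := by
              apply ih
              · omega
              · intro hin'; rw [hlen] at hin' ⊢; push_cast at hf4 ⊢; omega
              · intro hin'; rw [hlen] at hin' ⊢; push_cast at hg2 ⊢; omega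
            rw [step]
            have hff : flipB g' (PySem.List.pySetD r m (some 0)) (m-1) =
                flipB (g'+1) (PySem.List.pySetD r m (some 0)) (m-1) := by
              apply flip_fuel
              intro hin'; rw [hlen] at hin' ⊢; push_cast at hg2 ⊢; omega
            unfold finishB
            rw [flipB_succ g' r m, hg]
            simp [hff]
          · simp [hx0, hx1, hret0, finishB, hstop (by simp [hx1]), hg]

-- A's state-2 recursion equals B's scan-then-flip composition
theorem ML2 : ∀ (f : Nat) (r : List (Option Int)) (i : Int),
    2 ≤ f →
    ((-(r.length : Int) ≤ i ∧ i < (r.length : Int)) →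
      (r.length : Int) - i + 2 * (r.length : Int) + 8 ≤ (f : Int)) →
    goA f r i 2 =
      (match scanB (4 * r.length + 9) r i with
        | some u => finishB (4 * r.length + 9) r (u-1)
        | none => r) := by
  intro f
  induction f with
  | zero => intro r i hf; omega
  | succ f ih =>
    intro r i hf hfi
    rw [goA_succ]
    norm_num
    obtain ⟨F', hF⟩ : ∃ F', 4 * r.length + 9 = F'+1 := ⟨4 * r.length + 8, rfl⟩
    cases hg : PySem.List.pyGet? r i with
    | none => rw [hF, scanB_succ, hg]
    | some v =>
      have hin := pyGet?_some_inRange hg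
      have hb := hfi hin
      cases v with
      | none =>
        rw [hF, scanB_succ, hg]
        apply ML3
        · omega
        · intro hin'; push_cast at hb ⊢; omega
        · intro hin'
          have : (F' : Int) = 4 * (r.length : Int) + 8 := by
            have : F' = 4 * r.length + 8 := by omega
            rw [this]; push_cast; ring
          omega
      | some x =>
        rw [hF, scanB_succ, hg]
        have hs : scanB F' r (i+1) = scanB (F'+1) r (i+1) := by
          apply scan_fuel
          intro hin'
          have : (F' : Int) = 4 * (r.length : Int) + 8 := by
            have : F' = 4 * r.length + 8 := by omega
            rw [this]; push_cast; ring
          omega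
        rw [hs, ← hF]
        exact ih r (i+1) (by omega) (fun _ => by push_cast at hb ⊢; omega)

-- the two ports agree on EVERY input (also outside Pre_, where both return the junk tape)
theorem port_eq : ∀ (r : List (Option Int)) (i : Int) (state : Int),
    machine r i state = machine_alt r i state := by
  intro r i state
  unfold machine machine_alt
  by_cases h0 : state = 0
  · subst h0
    rw [show (4 * r.length + 9 : Nat) = (4 * r.length + 8) + 1 from rfl, goA_succ]
    norm_num
  · by_cases h1 : state = 1
    · subst h1
      rw [show (4 * r.length + 9 : Nat) = (4 * r.length + 8) + 1 from rfl, goA_succ]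
      norm_num
      cases hg : PySem.List.pyGet? r i with
      | none => rfl
      | some v =>
        cases v with
        | none =>
          have hin := pyGet?_some_inRange hg
          have hbound : (-(r.length : Int) ≤ i+1 ∧ i+1 < (r.length : Int)) →
              (r.length : Int) - (i+1) + 2 * (r.length : Int) + 8 ≤ ((4 * r.length + 8 : Nat) : Int) :=
            fun _ => by push_cast; omega
          exact ML2 (4 * r.length + 8) r (i+1) (by omega) hbound
        | some x => rfl
    · by_cases h2 : state = 2
      · subst h2
        simp only [show ¬ ((2:Int) = 0) by norm_num, if_false]
        have hbound : (-(r.length : Int) ≤ i ∧ i < (r.length : Int)) →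
            (r.length : Int) - i + 2 * (r.length : Int) + 8 ≤ ((4 * r.length + 9 : Nat) : Int) :=
          fun hin => by push_cast; omega
        exact ML2 (4 * r.length + 9) r i (by omega) hbound
      · by_cases h3 : state = 3
        · subst h3
          simp only [show ¬ ((3:Int) = 0) by norm_num, show ¬ ((3:Int) = 1) by norm_num,
            show ¬ ((3:Int) = 2) by norm_num, if_false]
          have hb1 : (-(r.length : Int) ≤ i ∧ i < (r.length : Int)) →
              i + (r.length : Int) + 4 ≤ ((4 * r.length + 9 : Nat) : Int) :=
            fun hin => by push_cast; omega
          have hb2 : (-(r.length : Int) ≤ i ∧ i < (r.length : Int)) →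
              i + (r.length : Int) + 2 ≤ ((4 * r.length + 9 : Nat) : Int) :=
            fun hin => by push_cast; omega
          exact ML3 (4 * r.length + 9) (4 * r.length + 9) r i (by omega) hb1 hb2
        · rw [show (4 * r.length + 9 : Nat) = (4 * r.length + 8) + 1 from rfl, goA_succ]
          simp [h0, h1, h2, h3]

-- ===== VERDICT (by name: the statement is the Claim_ definition above) =====
theorem machine_spec : Claim_equal_machine := by
  intro r i state _ _
  unfold Spec_machine
  exact port_eq r i state
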